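-- pv_equiv track=rewrite | github.com/bildzeitung/adventofcode | 2020/17/p1.py | vis
-- ===== SOURCE A (Python) =====
-- def vis(puzzle):
--     minz, maxz = min(i[2] for i in puzzle), max(i[2] for i in puzzle)
--     miny, maxy = min(i[1] for i in puzzle), max(i[1] for i in puzzle)
--     minx, maxx = min(i[0] for i in puzzle), max(i[0] for i in puzzle)
--
--     plate = ""
--     for z in range(minz, maxz + 1):
--         for y in range(miny, maxy + 1):
--             plate += (
--                 "".join(
--                     ["#" if (x, y, z) in puzzle else "." for x in range(minx, maxx + 1)]
--                 )
--                 + "\n"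
--             )
--         plate += "\n"
--
--     return plate.strip()
-- ===== SOURCE B (Python) =====
-- def vis(puzzle):
--     # one pass computes the whole bounding box (A calls min()/max() six times);
--     # bounds start as None, so an empty puzzle still fails like A's min() does
--     bounds = None
--     for x, y, z in puzzle:
--         if bounds is None:
--             bounds = (x, x, y, y, z, z)
--         else:
--             mnx, mxx, mny, mxy, mnz, mxz = bounds
--             bounds = (min(mnx, x), max(mxx, x),
--                       min(mny, y), max(mxy, y),
--                       min(mnz, z), max(mxz, z))
--     mnx, mxx, mny, mxy, mnz, mxz = bounds
--
--     # dense grid of '.'; each point marks its own cell — no membership scan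
--     grid = [[["."] * (mxx - mnx + 1) for _ in range(mxy - mny + 1)]
--             for _ in range(mxz - mnz + 1)]
--     for x, y, z in puzzle:
--         grid[z - mnz][y - mny][x - mnx] = "#"
--
--     # rows joined by '\n', planes separated by a blank line — exactly the
--     # original's layout after its final strip()
--     return "\n\n".join(
--         "\n".join("".join(row) for row in plane) for plane in grid
--     )
-- ===== Notes on version B (the rewrite author's own statement) =====
-- stated objective: faster
-- what changed: B computes the bounding box in one pass with running min/max variables instead of six min()/max() generator calls, then allocates a dense 3-D grid of '.' and marks '#' only at the points themselves, rendering with joins; A's per-cell '(x,y,z) in puzzle' membership scan inside three nested range loops disappears.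
import Mathlib
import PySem

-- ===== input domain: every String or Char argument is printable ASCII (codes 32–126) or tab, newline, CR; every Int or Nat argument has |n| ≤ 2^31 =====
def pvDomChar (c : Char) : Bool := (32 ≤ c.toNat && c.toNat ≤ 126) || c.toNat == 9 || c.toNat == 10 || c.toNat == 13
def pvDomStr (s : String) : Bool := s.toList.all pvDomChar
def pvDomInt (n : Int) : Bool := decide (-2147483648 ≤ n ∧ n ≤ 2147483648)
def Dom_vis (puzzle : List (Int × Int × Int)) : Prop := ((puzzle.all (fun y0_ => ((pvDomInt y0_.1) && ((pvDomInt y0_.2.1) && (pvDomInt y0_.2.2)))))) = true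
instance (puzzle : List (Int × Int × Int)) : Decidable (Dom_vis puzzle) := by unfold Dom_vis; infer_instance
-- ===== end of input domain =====

-- B computes the bounding box in one running-min/max pass and replaces A's per-cell
-- membership scan by a dense grid marked once per point (objective: faster).


-- ===== PORT A =====
-- min()/max() of an empty generator raise ValueError in Python; Pre_vis excludes
-- puzzle = [], so the '.getD 0' defaults below are never reached under Pre_vis.
def vis (puzzle : List (Int × Int × Int)) : String :=
  let mnz := (PySem.List.min? (puzzle.map (fun i => i.2.2)) (fun v => v)).getD 0
  let mxz := (PySem.List.max? (puzzle.map (fun i => i.2.2)) (fun v => v)).getD 0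
  let mny := (PySem.List.min? (puzzle.map (fun i => i.2.1)) (fun v => v)).getD 0
  let mxy := (PySem.List.max? (puzzle.map (fun i => i.2.1)) (fun v => v)).getD 0
  let mnx := (PySem.List.min? (puzzle.map (fun i => i.1)) (fun v => v)).getD 0
  let mxx := (PySem.List.max? (puzzle.map (fun i => i.1)) (fun v => v)).getD 0
  let plate := (PySem.List.pyRange mnz (mxz + 1) 1).foldl (fun plate z =>
      ((PySem.List.pyRange mny (mxy + 1) 1).foldl (fun plate y =>
        plate ++ (PySem.Str.join "" ((PySem.List.pyRange mnx (mxx + 1) 1).map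
            (fun x => if (x, y, z) ∈ puzzle then "#" else "."))) ++ "\n") plate) ++ "\n") ""
  PySem.Str.strip plate

-- ===== PORT B =====
-- Transliteration of Source B: running bounds start as None and are set by the first
-- point (so an empty puzzle leaves them None and Python raises TypeError at the
-- unpacking below — excluded by Pre_vis, seen here as the unreachable none
-- branch).  The dense grid of '.' is built once and each point marks its own
-- cell.  The indices z-mnz, y-mny, x-mnx are ≥ 0 and in range by the computed
-- bounds, so Nat-indexed modify/set is exact.
def vis_alt (puzzle : List (Int × Int × Int)) : String :=
  let bds := puzzle.foldl (fun bds p =>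
      match bds with
      | none => some (p.1, p.1, p.2.1, p.2.1, p.2.2, p.2.2)
      | some (mnx, mxx, mny, mxy, mnz, mxz) =>
          some (min mnx p.1, max mxx p.1, min mny p.2.1, max mxy p.2.1,
                min mnz p.2.2, max mxz p.2.2))
    (none : Option (Int × Int × Int × Int × Int × Int))
  match bds with
  | none => ""  -- unreachable under Pre_vis: Python raises TypeError here
  | some (mnx, mxx, mny, mxy, mnz, mxz) =>
    let grid0 := List.replicate (mxz - mnz + 1).toNat
        (List.replicate (mxy - mny + 1).toNat
          (List.replicate (mxx - mnx + 1).toNat '.'))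
    let grid := puzzle.foldl (fun g p =>
        g.modify (p.2.2 - mnz).toNat (fun plane =>
          plane.modify (p.2.1 - mny).toNat (fun row =>
            row.set (p.1 - mnx).toNat '#'))) grid0
    PySem.Str.join "\n\n" (grid.map (fun plane =>
      PySem.Str.join "\n" (plane.map (fun row => String.ofList row))))

-- ===== PRECONDITION & SPEC =====
-- Pre_vis excludes only the empty list, on which Python's min() (in A) and
-- puzzle[0] (in B) both raise.
def Pre_vis (puzzle : List (Int × Int × Int)) : Prop := puzzle ≠ []
instance (puzzle : List (Int × Int × Int)) : Decidable (Pre_vis puzzle) := by unfold Pre_vis; infer_instance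
def pvWitness_vis : (List (Int × Int × Int)) := [(0, 0, 0), (2, 1, 1), (0, 1, 0)]

def Spec_vis (puzzle : List (Int × Int × Int)) (out : String) : Prop := out = vis_alt puzzle
instance (puzzle : List (Int × Int × Int)) (out : String) : Decidable (Spec_vis puzzle out) := by unfold Spec_vis; infer_instance

-- ===== CLAIM (what is proved, stated in full; the proofs are below) =====
def Claim_equal_vis : Prop := ∀ (puzzle : List (Int × Int × Int)), Dom_vis puzzle → Pre_vis puzzle → Spec_vis puzzle (vis puzzle)

-- ===== LEMMAS AND PROOFS =====

-- A string-building foldl, read at the List Char level.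
theorem pv_foldl_toList {α : Type} (l : List α) (step : String → α → String) (G : α → List Char)
    (h : ∀ (s : String) (x : α), (step s x).toList = s.toList ++ G x) (init : String) :
    (l.foldl step init).toList = init.toList ++ (l.map G).flatten := by
  induction l generalizing init with
  | nil => simp
  | cons a t ih => simp [List.foldl_cons, ih, h]

theorem pv_intercalate_cons {α : Type} (sep p : List α) (ps : List (List α)) (h : ps ≠ []) :
    sep.intercalate (p :: ps) = p ++ sep ++ sep.intercalate ps := by
  cases ps with
  | nil => exact absurd rfl h
  | cons q qs => simp [List.intercalate, List.intersperse, List.append_assoc]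

-- '<row>\n' blocks concatenated = rows intercalated with '\n', plus a trailing '\n'.
theorem pv_flatten_map_append {α : Type} (l : List α) (g : α → List Char) (sep : List Char) (h : l ≠ []) :
    (l.map (fun a => g a ++ sep)).flatten = sep.intercalate (l.map g) ++ sep := by
  induction l with
  | nil => exact absurd rfl h
  | cons a t ih =>
    cases t with
    | nil => simp [List.intercalate]
    | cons b t' =>
      show g a ++ sep ++ (List.map (fun a => g a ++ sep) (b :: t')).flatten = _
      rw [ih (by simp), show List.map g (a :: b :: t') = g a :: List.map g (b :: t') from rfl,
          pv_intercalate_cons sep (g a) (List.map g (b :: t')) (by simp)]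
      simp [List.append_assoc]

theorem pv_head?_intercalate {α : Type} (sep p : List α) (ps : List (List α)) (h : p ≠ []) :
    (sep.intercalate (p :: ps)).head? = p.head? := by
  cases ps with
  | nil => simp [List.intercalate]
  | cons q qs =>
    rw [pv_intercalate_cons sep p (q :: qs) (by simp)]
    cases p with
    | nil => exact absurd rfl h
    | cons c cs => simp

theorem pv_getLast?_intercalate {α : Type} (sep p : List α) (ps : List (List α)) (h : p ≠ []) :
    (sep.intercalate (ps ++ [p])).getLast? = p.getLast? := by
  induction ps with
  | nil => simp [List.intercalate]
  | cons a t ih =>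
    rw [List.cons_append, pv_intercalate_cons sep a (t ++ [p]) (by simp)]
    have hsome : (sep.intercalate (t ++ [p])).getLast?.isSome := by
      rw [ih]
      cases p with
      | nil => exact absurd rfl h
      | cons c cs => simp
    rcases Option.isSome_iff_exists.mp hsome with ⟨v, hv⟩
    rw [List.getLast?_append, hv, Option.some_or, ← hv, ih]

-- Python's strip() removes exactly the trailing blank line here: the body starts
-- and ends with a non-whitespace character.
theorem pv_strip_append_two_nl (J : List Char) (hJ : J ≠ [])
    (hh : ∀ c, J.head? = some c → PySem.Chars.isspace c = false)
    (hl : ∀ c, J.getLast? = some c → PySem.Chars.isspace c = false) :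
    PySem.Chars.strip (J ++ ['\n', '\n']) = J := by
  cases J with
  | nil => exact absurd rfl hJ
  | cons c cs =>
    have hc : PySem.Chars.isspace c = false := hh c rfl
    unfold PySem.Chars.strip PySem.Chars.lstrip PySem.Chars.rstrip
    rw [List.cons_append, List.dropWhile_cons, hc]
    simp only [Bool.false_eq_true, if_false]
    have hrev : (c :: (cs ++ ['\n', '\n'])).reverse = '\n' :: '\n' :: (c :: cs).reverse := by
      simp
    rw [hrev]
    have hnl : PySem.Chars.isspace '\n' = true := by decide
    rw [List.dropWhile_cons, hnl, if_pos rfl, List.dropWhile_cons, hnl, if_pos rfl]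
    obtain ⟨d, r, hdr⟩ : ∃ d r, (c :: cs).reverse = d :: r := by
      cases hrl : (c :: cs).reverse with
      | nil => simp at hrl
      | cons d r => exact ⟨d, r, rfl⟩
    have hd : PySem.Chars.isspace d = false := by
      apply hl
      rw [← List.head?_reverse, hdr]; rfl
    rw [hdr, List.dropWhile_cons, hd]
    simp only [Bool.false_eq_true, if_false]
    rw [← hdr, List.reverse_reverse]

-- modify / set acting on a comprehension over a range hit exactly one coordinate.
theorem pv_set_map_pyRange {β : Type} (a b v : Int) (h1 : a ≤ v) (_h2 : v < b)
    (G : Int → β) (c : β) :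
    ((PySem.List.pyRange a b 1).map G).set (v - a).toNat c
      = (PySem.List.pyRange a b 1).map (fun x => if x = v then c else G x) := by
  apply List.ext_getElem
  · simp
  · intro i hi1 hi2
    simp only [List.length_set, List.length_map, PySem.List.length_pyRange_one] at hi1
    rw [List.getElem_set]
    simp only [List.getElem_map, PySem.List.getElem_pyRange_one]
    by_cases hiv : (v - a).toNat = i
    · rw [if_pos hiv, if_pos (by omega)]
    · rw [if_neg hiv, if_neg (by omega)]

theorem pv_modify_map_pyRange {β : Type} (a b v : Int) (h1 : a ≤ v) (_h2 : v < b)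
    (G : Int → β) (T : β → β) :
    ((PySem.List.pyRange a b 1).map G).modify (v - a).toNat T
      = (PySem.List.pyRange a b 1).map (fun x => if x = v then T (G x) else G x) := by
  apply List.ext_getElem
  · simp
  · intro i hi1 hi2
    simp only [List.length_modify, List.length_map, PySem.List.length_pyRange_one] at hi1
    rw [List.getElem_modify]
    simp only [List.getElem_map, PySem.List.getElem_pyRange_one]
    by_cases hiv : (v - a).toNat = i
    · rw [if_pos hiv, if_pos (by omega)]
    · rw [if_neg hiv, if_neg (by omega)]

-- The marking loop of B, run on a comprehension-shaped grid: each point flips its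
-- own cell to '#', so the result is the membership comprehension.
theorem pv_grid_fold (mnx mxx mny mxy mnz mxz : Int) (pts : List (Int × Int × Int))
    (hb : ∀ p ∈ pts, mnx ≤ p.1 ∧ p.1 ≤ mxx ∧ mny ≤ p.2.1 ∧ p.2.1 ≤ mxy ∧ mnz ≤ p.2.2 ∧ p.2.2 ≤ mxz)
    (F : Int → Int → Int → Char) :
    pts.foldl (fun g p =>
        g.modify (p.2.2 - mnz).toNat (fun plane =>
          plane.modify (p.2.1 - mny).toNat (fun row =>
            row.set (p.1 - mnx).toNat '#')))
      ((PySem.List.pyRange mnz (mxz + 1) 1).map (fun z =>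
        (PySem.List.pyRange mny (mxy + 1) 1).map (fun y =>
          (PySem.List.pyRange mnx (mxx + 1) 1).map (fun x => F x y z))))
    = (PySem.List.pyRange mnz (mxz + 1) 1).map (fun z =>
        (PySem.List.pyRange mny (mxy + 1) 1).map (fun y =>
          (PySem.List.pyRange mnx (mxx + 1) 1).map (fun x =>
            if (x, y, z) ∈ pts then '#' else F x y z))) := by
  induction pts generalizing F with
  | nil => simp
  | cons p rest ih =>
    obtain ⟨h1, h2, h3, h4, h5, h6⟩ := hb p (by simp)
    rw [List.foldl_cons]
    have hstep :
        ((PySem.List.pyRange mnz (mxz + 1) 1).map (fun z =>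
          (PySem.List.pyRange mny (mxy + 1) 1).map (fun y =>
            (PySem.List.pyRange mnx (mxx + 1) 1).map (fun x => F x y z)))).modify
            (p.2.2 - mnz).toNat (fun plane =>
              plane.modify (p.2.1 - mny).toNat (fun row =>
                row.set (p.1 - mnx).toNat '#'))
        = (PySem.List.pyRange mnz (mxz + 1) 1).map (fun z =>
            (PySem.List.pyRange mny (mxy + 1) 1).map (fun y =>
              (PySem.List.pyRange mnx (mxx + 1) 1).map (fun x =>
                if x = p.1 ∧ y = p.2.1 ∧ z = p.2.2 then '#' else F x y z))) := by
      rw [pv_modify_map_pyRange mnz (mxz + 1) p.2.2 h5 (by omega)]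
      apply List.map_congr_left
      intro z _
      by_cases hz : z = p.2.2
      · rw [if_pos hz, pv_modify_map_pyRange mny (mxy + 1) p.2.1 h3 (by omega)]
        apply List.map_congr_left
        intro y _
        by_cases hy : y = p.2.1
        · rw [if_pos hy, pv_set_map_pyRange mnx (mxx + 1) p.1 h1 (by omega)]
          apply List.map_congr_left
          intro x _
          by_cases hx : x = p.1
          · rw [if_pos hx, if_pos ⟨hx, hy, hz⟩]
          · rw [if_neg hx, if_neg (by tauto)]
        · rw [if_neg hy]
          apply List.map_congr_left
          intro x _
          rw [if_neg (by tauto)]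
      · rw [if_neg hz]
        apply List.map_congr_left
        intro y _
        apply List.map_congr_left
        intro x _
        rw [if_neg (by tauto)]
    rw [hstep, ih (fun p hp => hb p (by simp [hp]))]
    apply List.map_congr_left; intro z _
    apply List.map_congr_left; intro y _
    apply List.map_congr_left; intro x _
    by_cases hmem : (x, y, z) ∈ rest
    · rw [if_pos hmem, if_pos (by simp [hmem])]
    · rw [if_neg hmem]
      by_cases hp : x = p.1 ∧ y = p.2.1 ∧ z = p.2.2
      · rw [if_pos hp, if_pos (by
          obtain ⟨hx, hy, hz⟩ := hp
          exact List.mem_cons.mpr (Or.inl (by simp [hx, hy, hz])))]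
      · rw [if_neg hp, if_neg (by
          simp only [List.mem_cons]
          rintro (heq | hmem')
          · rw [Prod.ext_iff, Prod.ext_iff] at heq
            exact hp ⟨heq.1, heq.2.1, heq.2.2⟩
          · exact hmem hmem')]

theorem pv_join_nil (parts : List (List Char)) : PySem.Chars.join [] parts = parts.flatten := by
  induction parts with
  | nil => rfl
  | cons a t ih =>
    cases t with
    | nil => simp [PySem.Chars.join, List.intercalate]
    | cons b t' =>
      unfold PySem.Chars.join at ih ⊢
      rw [pv_intercalate_cons ([] : List Char) a (b :: t') (by simp), ih]
      simp

theorem pv_flatten_singletons {α β : Type} (l : List α) (g : α → β) :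
    (l.map (fun x => [g x])).flatten = l.map g := by
  induction l with
  | nil => rfl
  | cons a t ih => simp [ih]

theorem pv_pyRange_ne (a b : Int) (h : a ≤ b) : PySem.List.pyRange a (b + 1) 1 ≠ [] := by
  rw [PySem.List.pyRange_one_cons (by omega)]; simp

theorem pv_map_const_replicate {β : Type} (a b : Int) (x : β) (h : a ≤ b) :
    List.replicate (b - a + 1).toNat x = (PySem.List.pyRange a (b + 1) 1).map (fun _ => x) := by
  apply List.ext_getElem
  · simp only [List.length_replicate, List.length_map, PySem.List.length_pyRange_one]; omega
  · intro i h1 h2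
    simp [List.getElem_replicate]

theorem pv_isspace_hash_dot (b : Prop) [Decidable b] :
    PySem.Chars.isspace (if b then '#' else '.') = false := by
  by_cases h : b
  · rw [if_pos h]; decide
  · rw [if_neg h]; decide

-- The whole render, as one fact about an arbitrary bounding box [mnx,mxx]×[mny,mxy]×[mnz,mxz]
-- containing all the points.
theorem pv_core (mnx mxx mny mxy mnz mxz : Int) (pts : List (Int × Int × Int))
    (hx1 : mnx ≤ mxx) (hy1 : mny ≤ mxy) (hz1 : mnz ≤ mxz)
    (hb : ∀ p ∈ pts, mnx ≤ p.1 ∧ p.1 ≤ mxx ∧ mny ≤ p.2.1 ∧ p.2.1 ≤ mxy ∧ mnz ≤ p.2.2 ∧ p.2.2 ≤ mxz) :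
    PySem.Str.strip ((PySem.List.pyRange mnz (mxz + 1) 1).foldl (fun plate z =>
        ((PySem.List.pyRange mny (mxy + 1) 1).foldl (fun plate y =>
          plate ++ (PySem.Str.join "" ((PySem.List.pyRange mnx (mxx + 1) 1).map
              (fun x => if (x, y, z) ∈ pts then "#" else "."))) ++ "\n") plate) ++ "\n") "")
    = PySem.Str.join "\n\n" ((pts.foldl (fun g p =>
          g.modify (p.2.2 - mnz).toNat (fun plane =>
            plane.modify (p.2.1 - mny).toNat (fun row =>
              row.set (p.1 - mnx).toNat '#')))
        (List.replicate (mxz - mnz + 1).toNat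
          (List.replicate (mxy - mny + 1).toNat
            (List.replicate (mxx - mnx + 1).toNat '.')))).map (fun plane =>
      PySem.Str.join "\n" (plane.map (fun row => String.ofList row)))) := by
  -- row / plane building blocks
  have hrow : ∀ z y, (PySem.Str.join "" ((PySem.List.pyRange mnx (mxx + 1) 1).map
      (fun x => if (x, y, z) ∈ pts then "#" else "."))).toList
      = (PySem.List.pyRange mnx (mxx + 1) 1).map (fun x => if (x, y, z) ∈ pts then '#' else '.') := by
    intro z y
    rw [PySem.Str.toList_join, List.map_map]
    have hfn : (String.toList ∘ fun x => if (x, y, z) ∈ pts then ("#" : String) else ".")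
        = fun x => [if (x, y, z) ∈ pts then '#' else '.'] := by
      funext x
      by_cases h : (x, y, z) ∈ pts
      · simp [h]
      · simp [h]
    rw [hfn, show ("" : String).toList = ([] : List Char) from rfl, pv_join_nil,
        pv_flatten_singletons]
  have hinner : ∀ (s : String) (z : Int),
      ((PySem.List.pyRange mny (mxy + 1) 1).foldl (fun plate y =>
        plate ++ (PySem.Str.join "" ((PySem.List.pyRange mnx (mxx + 1) 1).map
            (fun x => if (x, y, z) ∈ pts then "#" else "."))) ++ "\n") s).toList
      = s.toList ++ ((PySem.List.pyRange mny (mxy + 1) 1).map (fun y =>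
          ((PySem.List.pyRange mnx (mxx + 1) 1).map
            (fun x => if (x, y, z) ∈ pts then '#' else '.')) ++ ['\n'])).flatten := by
    intro s z
    apply pv_foldl_toList
    intro s' y
    rw [String.toList_append, String.toList_append, hrow z y,
        show ("\n" : String).toList = ['\n'] from rfl, List.append_assoc]
  have houter : ((PySem.List.pyRange mnz (mxz + 1) 1).foldl (fun plate z =>
      ((PySem.List.pyRange mny (mxy + 1) 1).foldl (fun plate y =>
        plate ++ (PySem.Str.join "" ((PySem.List.pyRange mnx (mxx + 1) 1).map
            (fun x => if (x, y, z) ∈ pts then "#" else "."))) ++ "\n") plate) ++ "\n") "").toList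
      = ((PySem.List.pyRange mnz (mxz + 1) 1).map (fun z =>
          ((PySem.List.pyRange mny (mxy + 1) 1).map (fun y =>
            ((PySem.List.pyRange mnx (mxx + 1) 1).map
              (fun x => if (x, y, z) ∈ pts then '#' else '.')) ++ ['\n'])).flatten ++ ['\n'])).flatten := by
    have h0 := pv_foldl_toList (PySem.List.pyRange mnz (mxz + 1) 1)
      (fun plate z =>
        ((PySem.List.pyRange mny (mxy + 1) 1).foldl (fun plate y =>
          plate ++ (PySem.Str.join "" ((PySem.List.pyRange mnx (mxx + 1) 1).map
              (fun x => if (x, y, z) ∈ pts then "#" else "."))) ++ "\n") plate) ++ "\n")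
      (fun z =>
          ((PySem.List.pyRange mny (mxy + 1) 1).map (fun y =>
            ((PySem.List.pyRange mnx (mxx + 1) 1).map
              (fun x => if (x, y, z) ∈ pts then '#' else '.')) ++ ['\n'])).flatten ++ ['\n'])
      (by
        intro s z
        rw [String.toList_append, hinner s z, show ("\n" : String).toList = ['\n'] from rfl,
            List.append_assoc]) ""
    rw [h0, show ("" : String).toList = ([] : List Char) from rfl, List.nil_append]
  -- names for the plane strings
  have hRne : ∀ z y, (PySem.List.pyRange mnx (mxx + 1) 1).map
      (fun x => if (x, y, z) ∈ pts then '#' else '.') ≠ [] := by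
    intro z y
    simp only [ne_eq, List.map_eq_nil_iff]
    exact pv_pyRange_ne mnx mxx hx1
  -- the body J of the picture
  have hPhead : ∀ z : Int, (List.intercalate ['\n'] ((PySem.List.pyRange mny (mxy + 1) 1).map (fun y =>
      (PySem.List.pyRange mnx (mxx + 1) 1).map
        (fun x => if (x, y, z) ∈ pts then '#' else '.')))).head?
      = some (if (mnx, mny, z) ∈ pts then '#' else '.') := by
    intro z
    rw [PySem.List.pyRange_one_cons (show mny < mxy + 1 by omega), List.map_cons,
        pv_head?_intercalate _ _ _ (hRne z mny),
        PySem.List.pyRange_one_cons (show mnx < mxx + 1 by omega), List.map_cons]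
    rfl
  have hPne : ∀ z : Int, List.intercalate ['\n'] ((PySem.List.pyRange mny (mxy + 1) 1).map (fun y =>
      (PySem.List.pyRange mnx (mxx + 1) 1).map
        (fun x => if (x, y, z) ∈ pts then '#' else '.'))) ≠ [] := by
    intro z h
    have := hPhead z
    rw [h] at this
    simp at this
  have hPlast : ∀ z : Int, (List.intercalate ['\n'] ((PySem.List.pyRange mny (mxy + 1) 1).map (fun y =>
      (PySem.List.pyRange mnx (mxx + 1) 1).map
        (fun x => if (x, y, z) ∈ pts then '#' else '.')))).getLast?
      = some (if (mxx, mxy, z) ∈ pts then '#' else '.') := by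
    intro z
    rw [show mxy + 1 = (mxy - 1) + 1 + 1 by ring] at *
    rw [PySem.List.pyRange_one_succ_right (show mny ≤ mxy - 1 + 1 by omega), List.map_append,
        List.map_singleton,
        pv_getLast?_intercalate _ _ _ (hRne z (mxy - 1 + 1)),
        show mxx + 1 = (mxx - 1) + 1 + 1 by ring,
        PySem.List.pyRange_one_succ_right (show mnx ≤ mxx - 1 + 1 by omega), List.map_append,
        List.map_singleton, List.getLast?_concat]
    norm_num
  -- assemble
  rw [← String.toList_inj, PySem.Str.toList_strip, houter]
  have hflat1 : ∀ z : Int, ((PySem.List.pyRange mny (mxy + 1) 1).map (fun y =>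
      ((PySem.List.pyRange mnx (mxx + 1) 1).map
        (fun x => if (x, y, z) ∈ pts then '#' else '.')) ++ ['\n'])).flatten ++ ['\n']
      = List.intercalate ['\n'] ((PySem.List.pyRange mny (mxy + 1) 1).map (fun y =>
          (PySem.List.pyRange mnx (mxx + 1) 1).map
            (fun x => if (x, y, z) ∈ pts then '#' else '.'))) ++ ['\n', '\n'] := by
    intro z
    rw [pv_flatten_map_append _ _ ['\n'] (pv_pyRange_ne mny mxy hy1), List.append_assoc]
    rfl
  have hJhead : (List.intercalate ['\n', '\n'] ((PySem.List.pyRange mnz (mxz + 1) 1).map (fun z =>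
      List.intercalate ['\n'] ((PySem.List.pyRange mny (mxy + 1) 1).map (fun y =>
        (PySem.List.pyRange mnx (mxx + 1) 1).map
          (fun x => if (x, y, z) ∈ pts then '#' else '.')))))).head?
      = some (if (mnx, mny, mnz) ∈ pts then '#' else '.') := by
    rw [PySem.List.pyRange_one_cons (show mnz < mxz + 1 by omega), List.map_cons,
        pv_head?_intercalate _ _ _ (hPne mnz), hPhead mnz]
  have hJlast : (List.intercalate ['\n', '\n'] ((PySem.List.pyRange mnz (mxz + 1) 1).map (fun z =>
      List.intercalate ['\n'] ((PySem.List.pyRange mny (mxy + 1) 1).map (fun y =>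
        (PySem.List.pyRange mnx (mxx + 1) 1).map
          (fun x => if (x, y, z) ∈ pts then '#' else '.')))))).getLast?
      = some (if (mxx, mxy, mxz - 1 + 1) ∈ pts then '#' else '.') := by
    rw [show mxz + 1 = (mxz - 1) + 1 + 1 by ring,
        PySem.List.pyRange_one_succ_right (show mnz ≤ mxz - 1 + 1 by omega), List.map_append,
        List.map_singleton,
        pv_getLast?_intercalate _ _ _ (hPne (mxz - 1 + 1)), hPlast (mxz - 1 + 1)]
  have hJne : List.intercalate ['\n', '\n'] ((PySem.List.pyRange mnz (mxz + 1) 1).map (fun z =>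
      List.intercalate ['\n'] ((PySem.List.pyRange mny (mxy + 1) 1).map (fun y =>
        (PySem.List.pyRange mnx (mxx + 1) 1).map
          (fun x => if (x, y, z) ∈ pts then '#' else '.'))))) ≠ [] := by
    intro h
    rw [h] at hJhead
    simp at hJhead
  rw [List.map_congr_left (fun z _ => hflat1 z),
      pv_flatten_map_append _ _ ['\n', '\n'] (pv_pyRange_ne mnz mxz hz1),
      pv_strip_append_two_nl _ hJne
        (by intro c hc; rw [hJhead] at hc; cases hc; exact pv_isspace_hash_dot _)
        (by intro c hc; rw [hJlast] at hc; cases hc; exact pv_isspace_hash_dot _)]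
  -- the B side
  rw [pv_map_const_replicate mnz mxz _ hz1, pv_map_const_replicate mny mxy _ hy1,
      pv_map_const_replicate mnx mxx '.' hx1]
  rw [pv_grid_fold mnx mxx mny mxy mnz mxz pts hb (fun _ _ _ => '.')]
  rw [PySem.Str.toList_join, List.map_map]
  have hplane : (String.toList ∘ fun plane => PySem.Str.join "\n" (List.map (fun row => String.ofList row) plane))
      = fun plane : List (List Char) => List.intercalate ['\n'] plane := by
    funext plane
    show (PySem.Str.join "\n" (List.map (fun row => String.ofList row) plane)).toList = _
    rw [PySem.Str.toList_join, List.map_map]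
    have : (String.toList ∘ fun row : List Char => String.ofList row) = id := by
      funext row; exact String.toList_ofList
    rw [this, List.map_id, show ("\n" : String).toList = ['\n'] from rfl]
    rfl
  rw [hplane, List.map_map]
  show List.intercalate ['\n', '\n'] _ = PySem.Chars.join ("\n\n".toList) _
  rw [show ("\n\n" : String).toList = ['\n', '\n'] from rfl]
  rfl

-- B's running-bounds fold: once the state is some b0, it is six independent
-- min/max folds over the coordinate projections.
theorem pv_bounds_fold (pts : List (Int × Int × Int)) (b0 : Int × Int × Int × Int × Int × Int) :
    pts.foldl (fun bds p =>
        match bds with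
        | none => some (p.1, p.1, p.2.1, p.2.1, p.2.2, p.2.2)
        | some (mnx, mxx, mny, mxy, mnz, mxz) =>
            some (min mnx p.1, max mxx p.1, min mny p.2.1, max mxy p.2.1,
                  min mnz p.2.2, max mxz p.2.2)) (some b0)
    = some ((pts.map (fun p => p.1)).foldl min b0.1,
            (pts.map (fun p => p.1)).foldl max b0.2.1,
            (pts.map (fun p => p.2.1)).foldl min b0.2.2.1,
            (pts.map (fun p => p.2.1)).foldl max b0.2.2.2.1,
            (pts.map (fun p => p.2.2)).foldl min b0.2.2.2.2.1,
            (pts.map (fun p => p.2.2)).foldl max b0.2.2.2.2.2) := by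
  induction pts generalizing b0 with
  | nil => rfl
  | cons p rest ih =>
    obtain ⟨a1, a2, a3, a4, a5, a6⟩ := b0
    simp only [List.foldl_cons, List.map_cons]
    exact ih (min a1 p.1, max a2 p.1, min a3 p.2.1, max a4 p.2.1, min a5 p.2.2, max a6 p.2.2)

-- ===== VERDICT proof =====
theorem vis_spec : Claim_equal_vis := by
  intro puzzle hdom hpre
  unfold Spec_vis
  obtain ⟨q0, rest, hq⟩ : ∃ q0 rest, puzzle = q0 :: rest := by
    cases puzzle with
    | nil => exact absurd rfl hpre
    | cons a t => exact ⟨a, t, rfl⟩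
  obtain ⟨x0, y0, z0⟩ := q0
  subst hq
  -- the six extrema of A, via min?/max? on a cons
  have hmnx : PySem.List.min? (((x0, y0, z0) :: rest).map (fun i => i.1)) (fun v => v)
      = some ((rest.map (fun i => i.1)).foldl min x0) := by
    rw [List.map_cons, PySem.List.min?_id_cons]
  have hmxx : PySem.List.max? (((x0, y0, z0) :: rest).map (fun i => i.1)) (fun v => v)
      = some ((rest.map (fun i => i.1)).foldl max x0) := by
    rw [List.map_cons, PySem.List.max?_id_cons]
  have hmny : PySem.List.min? (((x0, y0, z0) :: rest).map (fun i => i.2.1)) (fun v => v)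
      = some ((rest.map (fun i => i.2.1)).foldl min y0) := by
    rw [List.map_cons, PySem.List.min?_id_cons]
  have hmxy : PySem.List.max? (((x0, y0, z0) :: rest).map (fun i => i.2.1)) (fun v => v)
      = some ((rest.map (fun i => i.2.1)).foldl max y0) := by
    rw [List.map_cons, PySem.List.max?_id_cons]
  have hmnz : PySem.List.min? (((x0, y0, z0) :: rest).map (fun i => i.2.2)) (fun v => v)
      = some ((rest.map (fun i => i.2.2)).foldl min z0) := by
    rw [List.map_cons, PySem.List.min?_id_cons]
  have hmxz : PySem.List.max? (((x0, y0, z0) :: rest).map (fun i => i.2.2)) (fun v => v)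
      = some ((rest.map (fun i => i.2.2)).foldl max z0) := by
    rw [List.map_cons, PySem.List.max?_id_cons]
  set mnx := (rest.map (fun i => i.1)).foldl min x0 with hdefmnx
  set mxx := (rest.map (fun i => i.1)).foldl max x0 with hdefmxx
  set mny := (rest.map (fun i => i.2.1)).foldl min y0 with hdefmny
  set mxy := (rest.map (fun i => i.2.1)).foldl max y0 with hdefmxy
  set mnz := (rest.map (fun i => i.2.2)).foldl min z0 with hdefmnz
  set mxz := (rest.map (fun i => i.2.2)).foldl max z0 with hdefmxz
  -- bounds facts
  have hminle : ∀ (l : List Int) (a : Int), l.foldl min a ≤ a ∧ ∀ x ∈ l, l.foldl min a ≤ x := by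
    intro l
    induction l with
    | nil => intro a; exact ⟨le_refl a, by simp⟩
    | cons b t ih =>
      intro a
      obtain ⟨h1, h2⟩ := ih (min a b)
      refine ⟨le_trans h1 (min_le_left a b), ?_⟩
      intro x hx
      rcases List.mem_cons.mp hx with h | h
      · subst h; exact le_trans h1 (min_le_right a x)
      · exact h2 x h
  have hmaxle : ∀ (l : List Int) (a : Int), a ≤ l.foldl max a ∧ ∀ x ∈ l, x ≤ l.foldl max a := by
    intro l
    induction l with
    | nil => intro a; exact ⟨le_refl a, by simp⟩
    | cons b t ih =>
      intro a
      obtain ⟨h1, h2⟩ := ih (max a b)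
      refine ⟨le_trans (le_max_left a b) h1, ?_⟩
      intro x hx
      rcases List.mem_cons.mp hx with h | h
      · subst h; exact le_trans (le_max_right a x) h1
      · exact h2 x h
  have hb : ∀ p ∈ (x0, y0, z0) :: rest,
      mnx ≤ p.1 ∧ p.1 ≤ mxx ∧ mny ≤ p.2.1 ∧ p.2.1 ≤ mxy ∧ mnz ≤ p.2.2 ∧ p.2.2 ≤ mxz := by
    intro p hp
    rcases List.mem_cons.mp hp with h | h
    · subst h
      exact ⟨(hminle _ x0).1, (hmaxle _ x0).1, (hminle _ y0).1, (hmaxle _ y0).1,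
             (hminle _ z0).1, (hmaxle _ z0).1⟩
    · exact ⟨(hminle _ x0).2 p.1 (List.mem_map_of_mem h),
             (hmaxle _ x0).2 p.1 (List.mem_map_of_mem h),
             (hminle _ y0).2 p.2.1 (List.mem_map_of_mem h),
             (hmaxle _ y0).2 p.2.1 (List.mem_map_of_mem h),
             (hminle _ z0).2 p.2.2 (List.mem_map_of_mem h),
             (hmaxle _ z0).2 p.2.2 (List.mem_map_of_mem h)⟩
  have hx1 : mnx ≤ mxx := le_trans (hminle _ x0).1 (hmaxle _ x0).1
  have hy1 : mny ≤ mxy := le_trans (hminle _ y0).1 (hmaxle _ y0).1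
  have hz1 : mnz ≤ mxz := le_trans (hminle _ z0).1 (hmaxle _ z0).1
  -- B's fold: the first point seeds the bounds, the rest are the six min/max folds
  have hBfold : ((x0, y0, z0) :: rest).foldl (fun bds p =>
        match bds with
        | none => some (p.1, p.1, p.2.1, p.2.1, p.2.2, p.2.2)
        | some (mnx, mxx, mny, mxy, mnz, mxz) =>
            some (min mnx p.1, max mxx p.1, min mny p.2.1, max mxy p.2.1,
                  min mnz p.2.2, max mxz p.2.2))
      (none : Option (Int × Int × Int × Int × Int × Int))
      = some (mnx, mxx, mny, mxy, mnz, mxz) := by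
    rw [List.foldl_cons]
    exact pv_bounds_fold rest (x0, x0, y0, y0, z0, z0)
  show vis ((x0, y0, z0) :: rest) = vis_alt ((x0, y0, z0) :: rest)
  unfold vis vis_alt
  simp only [hmnz, hmxz, hmny, hmxy, hmnx, hmxx, Option.getD_some, hBfold]
  exact pv_core mnx mxx mny mxy mnz mxz ((x0, y0, z0) :: rest) hx1 hy1 hz1 hb
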